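-- pv_equiv track=rewrite | github.com/CISLAB-web/WristHOI-v1 | wrist_hoi/dataset/public_multiview.py | _select_fixed_cam
-- ===== SOURCE A (Python) =====
-- from typing import Dict, List, Optional, Sequence
--
-- def _select_fixed_cam(fixed_cameras: dict, requested_cam: str) -> str:
--     """与 ``PublicSequenceVisualizer._select_fixed_cam`` 相同逻辑。"""
--     requested_cam = str(requested_cam)
--     complete: List[str] = []
--     partial: List[str] = []
--     for cam, info in fixed_cameras.items():
--         has_k = info.get("K") is not None
--         has_t = info.get("T_camera_world") is not None
--         if has_k and has_t:
--             complete.append(cam)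
--         elif has_t:
--             partial.append(cam)
--     if requested_cam in complete:
--         return requested_cam
--     if complete:
--         return sorted(complete)[0]
--     if requested_cam in partial:
--         return requested_cam
--     if partial:
--         return sorted(partial)[0]
--     raise RuntimeError(
--         "no fixed camera with extrinsics (T_camera_world) found. "
--         "Export with --intri_yml to include intrinsics, or ensure extri.yml is provided."
--     )
-- ===== SOURCE B (Python) =====
-- def _select_fixed_cam(fixed_cameras: dict, requested_cam: str) -> str:
--     """Single-pass selection: rank every usable camera by (tier, not-requested, name)
--     and return the name of the minimum-ranked candidate."""
--     requested_cam = str(requested_cam)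
--     candidates = []
--     for cam, info in fixed_cameras.items():
--         if info.get("T_camera_world") is None:
--             continue
--         tier = 0 if info.get("K") is not None else 1
--         candidates.append((tier, cam != requested_cam, cam))
--     if not candidates:
--         raise RuntimeError(
--             "no fixed camera with extrinsics (T_camera_world) found. "
--             "Export with --intri_yml to include intrinsics, or ensure extri.yml is provided."
--         )
--     return min(candidates)[2]
-- ===== Notes on version B (the rewrite author's own statement) =====
-- stated objective: simpler
-- what changed: Replaces the two classification lists plus four-branch return cascade by one candidate list ranked by the key (tier, cam != requested, cam) and a single min(); the RuntimeError on inputs with no usable camera is kept identical and those inputs are outside Pre_.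
import Mathlib
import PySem

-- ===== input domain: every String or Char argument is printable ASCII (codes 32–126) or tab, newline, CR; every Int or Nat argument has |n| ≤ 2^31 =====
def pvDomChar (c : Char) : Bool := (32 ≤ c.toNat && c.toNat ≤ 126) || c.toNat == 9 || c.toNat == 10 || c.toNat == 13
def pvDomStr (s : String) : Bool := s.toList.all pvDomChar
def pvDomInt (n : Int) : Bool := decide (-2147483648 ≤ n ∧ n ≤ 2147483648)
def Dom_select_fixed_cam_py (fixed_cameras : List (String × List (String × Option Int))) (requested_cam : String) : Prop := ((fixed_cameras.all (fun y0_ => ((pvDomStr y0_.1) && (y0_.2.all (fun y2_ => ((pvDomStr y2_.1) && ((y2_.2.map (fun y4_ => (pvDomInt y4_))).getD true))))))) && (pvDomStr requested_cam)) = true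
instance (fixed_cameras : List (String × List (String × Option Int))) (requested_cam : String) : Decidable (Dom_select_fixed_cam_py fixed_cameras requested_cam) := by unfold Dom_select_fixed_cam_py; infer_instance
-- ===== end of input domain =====

-- B replaces A's two classification lists and four-branch return cascade by one ranked
-- candidate list and a single minimum; objective: simpler. Both raise (→ Pre_) when no
-- camera has extrinsics.


-- ===== PORT A =====
-- shared helper: `info.get(k) is not None` (dict value type is Option Int, so the
-- lookup must both find the key and find a non-None value); first-match lookup
def pyHasVal (info : List (String × Option Int)) (k : String) : Bool :=
  match (PySem.Dict.mk info).get? k with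
  | some (some _) => true
  | _ => false

def select_fixed_cam_py (fixed_cameras : List (String × List (String × Option Int))) (requested_cam : String) : String :=
  let cp := fixed_cameras.foldl (fun (cp : List String × List String) p =>
    let has_k := pyHasVal p.2 "K"
    let has_t := pyHasVal p.2 "T_camera_world"
    if has_k && has_t then (cp.1 ++ [p.1], cp.2)
    else if has_t then (cp.1, cp.2 ++ [p.1])
    else cp) ([], [])
  if cp.1.contains requested_cam then requested_cam
  else if !cp.1.isEmpty then
    (match PySem.List.sorted cp.1 (fun x => x) false with
     | s :: _ => s
     | [] => "")   -- unreachable: guarded by the isEmpty test (sorted(complete)[0])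
  else if cp.2.contains requested_cam then requested_cam
  else if !cp.2.isEmpty then
    (match PySem.List.sorted cp.2 (fun x => x) false with
     | s :: _ => s
     | [] => "")
  else ""          -- raise RuntimeError: excluded by Pre_select_fixed_cam_py

-- ===== PORT B =====
-- Python tuple comparison on (int, bool, str), exact (False < True as in Python)
def pyKeyLt (a b : Int × Bool × String) : Bool :=
  if a.1 ≠ b.1 then decide (a.1 < b.1)
  else if a.2.1 ≠ b.2.1 then !a.2.1 && b.2.1
  else decide (a.2.2 < b.2.2)

def select_fixed_cam_py_alt (fixed_cameras : List (String × List (String × Option Int))) (requested_cam : String) : String :=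
  let candidates := fixed_cameras.foldl (fun acc p =>
    if pyHasVal p.2 "T_camera_world" then
      acc ++ [((if pyHasVal p.2 "K" then (0 : Int) else 1), decide (p.1 ≠ requested_cam), p.1)]
    else acc) []
  match candidates with
  | [] => ""       -- raise RuntimeError: excluded by Pre_select_fixed_cam_py
  | c :: rest => (rest.foldl (fun m x => if pyKeyLt x m then x else m) c).2.2

-- ===== PRECONDITION & SPEC =====
-- Pre_ excludes exactly the inputs where both Pythons raise the RuntimeError:
-- no camera has a non-None "T_camera_world" entry.
def Pre_select_fixed_cam_py (fixed_cameras : List (String × List (String × Option Int))) (requested_cam : String) : Prop :=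
  fixed_cameras.any (fun p => pyHasVal p.2 "T_camera_world") = true
instance (fixed_cameras : List (String × List (String × Option Int))) (requested_cam : String) : Decidable (Pre_select_fixed_cam_py fixed_cameras requested_cam) := by unfold Pre_select_fixed_cam_py; infer_instance

def pvWitness_select_fixed_cam_py : (List (String × List (String × Option Int))) × String :=
  ([("cam0", [("T_camera_world", some 1)]), ("cam1", [("K", some 2), ("T_camera_world", some 3)])], "cam0")

def Spec_select_fixed_cam_py (fixed_cameras : List (String × List (String × Option Int))) (requested_cam : String) (out : String) : Prop := out = select_fixed_cam_py_alt fixed_cameras requested_cam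
instance (fixed_cameras : List (String × List (String × Option Int))) (requested_cam : String) (out : String) : Decidable (Spec_select_fixed_cam_py fixed_cameras requested_cam out) := by unfold Spec_select_fixed_cam_py; infer_instance

-- ===== CLAIM (what is proved, stated in full; the proofs are below) =====
def Claim_equal_select_fixed_cam_py : Prop := ∀ (fixed_cameras : List (String × List (String × Option Int))) (requested_cam : String), Dom_select_fixed_cam_py fixed_cameras requested_cam → Pre_select_fixed_cam_py fixed_cameras requested_cam → Spec_select_fixed_cam_py fixed_cameras requested_cam (select_fixed_cam_py fixed_cameras requested_cam)

-- ===== LEMMAS AND PROOFS =====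

-- the lexicographic key the comparison pyKeyLt realises
def pvKey (a : Int × Bool × String) : Int ×ₗ Bool ×ₗ String := toLex (a.1, toLex (a.2.1, a.2.2))

theorem pvKey_lt_iff (a b : Int × Bool × String) : pyKeyLt a b = true ↔ pvKey a < pvKey b := by
  obtain ⟨a1, a2, a3⟩ := a
  obtain ⟨b1, b2, b3⟩ := b
  simp only [pyKeyLt, pvKey, Prod.Lex.lt_iff]
  by_cases h1 : a1 = b1 <;> by_cases h2 : a2 = b2 <;>
    cases a2 <;> cases b2 <;> simp_all [Bool.lt_iff] <;> omega

theorem pvKey_inj {a b : Int × Bool × String} (h : pvKey a = pvKey b) : a = b := by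
  obtain ⟨a1, a2, a3⟩ := a
  obtain ⟨b1, b2, b3⟩ := b
  simpa [pvKey] using h

-- the running-minimum fold returns a member that is key-minimal
theorem pvMinFold_spec (rest : List (Int × Bool × String)) (c : Int × Bool × String) :
    (rest.foldl (fun m x => if pyKeyLt x m then x else m) c) ∈ c :: rest ∧
    ∀ y ∈ c :: rest, pvKey (rest.foldl (fun m x => if pyKeyLt x m then x else m) c) ≤ pvKey y := by
  induction rest generalizing c with
  | nil => simp
  | cons x rest ih =>
    simp only [List.foldl_cons]
    obtain ⟨ihm, ihmin⟩ := ih (if pyKeyLt x c then x else c)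
    have hcx : pvKey (if pyKeyLt x c then x else c) ≤ pvKey c ∧
        pvKey (if pyKeyLt x c then x else c) ≤ pvKey x := by
      by_cases h : pyKeyLt x c = true
      · rw [if_pos h]
        exact ⟨le_of_lt ((pvKey_lt_iff x c).mp h), le_refl _⟩
      · rw [if_neg h]
        exact ⟨le_refl _, le_of_not_gt (fun hlt => h ((pvKey_lt_iff x c).mpr hlt))⟩
    constructor
    · rcases List.mem_cons.mp ihm with hm | hm
      · rw [hm]
        by_cases h : pyKeyLt x c = true
        · rw [if_pos h]
          exact List.mem_cons_of_mem _ (List.mem_cons_self ..)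
        · rw [if_neg h]
          exact List.mem_cons_self ..
      · exact List.mem_cons_of_mem _ (List.mem_cons_of_mem _ hm)
    · intro y hy
      have hc' := ihmin _ (List.mem_cons_self ..)
      rcases List.mem_cons.mp hy with rfl | hy
      · exact le_trans hc' hcx.1
      rcases List.mem_cons.mp hy with rfl | hy
      · exact le_trans hc' hcx.2
      · exact ihmin _ (List.mem_cons_of_mem _ hy)

-- the candidate list B builds, and A's two classification lists, as filter/map forms
def pvCands (req : String) (l : List (String × List (String × Option Int))) : List (Int × Bool × String) :=
  l.filterMap (fun p =>
    if pyHasVal p.2 "T_camera_world" then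
      some ((if pyHasVal p.2 "K" then (0 : Int) else 1), decide (p.1 ≠ req), p.1)
    else none)

def pvCompl (l : List (String × List (String × Option Int))) : List String :=
  (l.filter (fun p => pyHasVal p.2 "K" && pyHasVal p.2 "T_camera_world")).map (·.1)

def pvPart (l : List (String × List (String × Option Int))) : List String :=
  (l.filter (fun p => !pyHasVal p.2 "K" && pyHasVal p.2 "T_camera_world")).map (·.1)

theorem pvFoldA (l : List (String × List (String × Option Int))) (c0 p0 : List String) :
    l.foldl (fun (cp : List String × List String) p =>
      let has_k := pyHasVal p.2 "K"
      let has_t := pyHasVal p.2 "T_camera_world"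
      if has_k && has_t then (cp.1 ++ [p.1], cp.2)
      else if has_t then (cp.1, cp.2 ++ [p.1])
      else cp) (c0, p0) = (c0 ++ pvCompl l, p0 ++ pvPart l) := by
  induction l generalizing c0 p0 with
  | nil => simp [pvCompl, pvPart]
  | cons p l ih =>
    rw [List.foldl_cons]
    cases hk : pyHasVal p.2 "K" <;> cases ht : pyHasVal p.2 "T_camera_world" <;>
      simp only [hk, ht, Bool.and_true, Bool.and_false, Bool.and_self, if_true, if_false,
        ite_true, ite_false, Bool.false_eq_true, Bool.true_eq_false] <;>
      rw [ih] <;>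
      simp [pvCompl, pvPart, List.filter_cons, hk, ht]

theorem pvFoldB (req : String) (l : List (String × List (String × Option Int))) (acc : List (Int × Bool × String)) :
    l.foldl (fun acc p =>
      if pyHasVal p.2 "T_camera_world" then
        acc ++ [((if pyHasVal p.2 "K" then (0 : Int) else 1), decide (p.1 ≠ req), p.1)]
      else acc) acc = acc ++ pvCands req l := by
  induction l generalizing acc with
  | nil => simp [pvCands]
  | cons p l ih =>
    rw [List.foldl_cons]
    cases ht : pyHasVal p.2 "T_camera_world" <;>
      simp only [ht, if_true, if_false, ite_true, ite_false, Bool.false_eq_true] <;>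
      rw [ih] <;>
      simp [pvCands, List.filterMap_cons, ht]

theorem pv_mem_compl_iff (req : String) (l : List (String × List (String × Option Int))) (s : String) :
    s ∈ pvCompl l ↔ ((0 : Int), decide (s ≠ req), s) ∈ pvCands req l := by
  simp only [pvCompl, pvCands, List.mem_map, List.mem_filter, List.mem_filterMap]
  constructor
  · rintro ⟨p, ⟨hp, hb⟩, rfl⟩
    refine ⟨p, hp, ?_⟩
    simp only [Bool.and_eq_true] at hb
    simp [hb.1, hb.2]
  · rintro ⟨p, hp, h⟩
    by_cases ht : pyHasVal p.2 "T_camera_world" = true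
    swap
    · rw [if_neg ht] at h; simp at h
    rw [if_pos ht] at h
    simp only [Option.some.injEq, Prod.mk.injEq] at h
    have hk : pyHasVal p.2 "K" = true := by
      by_contra hk
      rw [Bool.not_eq_true] at hk
      rw [hk] at h
      simp at h
    refine ⟨p, ⟨hp, by simp [hk, ht]⟩, h.2.2⟩

theorem pv_mem_part_iff (req : String) (l : List (String × List (String × Option Int))) (s : String) :
    s ∈ pvPart l ↔ ((1 : Int), decide (s ≠ req), s) ∈ pvCands req l := by
  simp only [pvPart, pvCands, List.mem_map, List.mem_filter, List.mem_filterMap]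
  constructor
  · rintro ⟨p, ⟨hp, hb⟩, rfl⟩
    refine ⟨p, hp, ?_⟩
    simp only [Bool.and_eq_true, Bool.not_eq_true'] at hb
    simp [hb.1, hb.2]
  · rintro ⟨p, hp, h⟩
    by_cases ht : pyHasVal p.2 "T_camera_world" = true
    swap
    · rw [if_neg ht] at h; simp at h
    rw [if_pos ht] at h
    simp only [Option.some.injEq, Prod.mk.injEq] at h
    have hk : pyHasVal p.2 "K" = false := by
      by_contra hk
      rw [Bool.not_eq_false] at hk
      rw [hk] at h
      simp at h
    refine ⟨p, ⟨hp, by simp [hk, ht]⟩, h.2.2⟩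

-- shape of every candidate: tier 0/1, flag determined by the name, name classified
theorem pv_cands_shape (req : String) (l : List (String × List (String × Option Int)))
    {y : Int × Bool × String} (hy : y ∈ pvCands req l) :
    y.2.1 = decide (y.2.2 ≠ req) ∧
      ((y.1 = 0 ∧ y.2.2 ∈ pvCompl l) ∨ (y.1 = 1 ∧ y.2.2 ∈ pvPart l)) := by
  have hy' := hy
  simp only [pvCands, List.mem_filterMap] at hy'
  obtain ⟨p, hp, h⟩ := hy'
  by_cases ht : pyHasVal p.2 "T_camera_world" = true
  swap
  · rw [if_neg ht] at h; simp at h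
  rw [if_pos ht] at h
  simp only [Option.some.injEq] at h
  subst h
  refine ⟨rfl, ?_⟩
  cases hk : pyHasVal p.2 "K"
  · refine Or.inr ⟨by simp, ?_⟩
    rw [hk] at hy
    exact (pv_mem_part_iff req l p.1).mpr (by simpa using hy)
  · refine Or.inl ⟨by simp, ?_⟩
    rw [hk] at hy
    exact (pv_mem_compl_iff req l p.1).mpr (by simpa using hy)

theorem pvKey_le_iff (a b : Int × Bool × String) :
    pvKey a ≤ pvKey b ↔
      a.1 < b.1 ∨ (a.1 = b.1 ∧ (a.2.1 < b.2.1 ∨ (a.2.1 = b.2.1 ∧ a.2.2 ≤ b.2.2))) := by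
  simp [pvKey, Prod.Lex.le_iff]

theorem pv_min_unique {cs : List (Int × Bool × String)} {m k : Int × Bool × String}
    (hm : m ∈ cs) (hmin : ∀ y ∈ cs, pvKey m ≤ pvKey y)
    (hk : k ∈ cs) (hkmin : ∀ y ∈ cs, pvKey k ≤ pvKey y) : m = k :=
  pvKey_inj (le_antisymm (hmin k hk) (hkmin m hm))

-- the minimum candidate named by each of A's four branches
theorem pv_min_compl_self (req : String) (fc : List (String × List (String × Option Int)))
    (hreq : req ∈ pvCompl fc) :
    ∀ y ∈ pvCands req fc, pvKey ((0 : Int), false, req) ≤ pvKey y := by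
  rintro ⟨y1, y2, y3⟩ hy
  obtain ⟨hflag, hcls⟩ := pv_cands_shape req fc hy
  dsimp only at hflag
  rw [pvKey_le_iff]
  rcases hcls with ⟨hy1, _⟩ | ⟨hy1, _⟩
  · right
    refine ⟨hy1.symm, ?_⟩
    by_cases hy3 : y3 = req
    · right
      simp only [hflag]
      simp [hy3]
    · left
      simp only [hflag]
      simp [hy3, Bool.lt_iff]
  · left
    rw [hy1]
    norm_num

theorem pv_min_compl_head (req : String) (fc : List (String × List (String × Option Int)))
    (hreq : req ∉ pvCompl fc) {s : String}
    (hmin : ∀ y ∈ pvCompl fc, s ≤ y) :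
    ∀ y ∈ pvCands req fc, pvKey ((0 : Int), true, s) ≤ pvKey y := by
  rintro ⟨y1, y2, y3⟩ hy
  obtain ⟨hflag, hcls⟩ := pv_cands_shape req fc hy
  dsimp only at hflag
  rw [pvKey_le_iff]
  rcases hcls with ⟨hy1, hyc⟩ | ⟨hy1, _⟩
  · right
    refine ⟨hy1.symm, Or.inr ⟨?_, hmin _ hyc⟩⟩
    have : y3 ≠ req := fun h => hreq (h ▸ hyc)
    simp [hflag, this]
  · left
    rw [hy1]
    norm_num

theorem pv_min_part_self (req : String) (fc : List (String × List (String × Option Int)))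
    (hc : pvCompl fc = []) (hreq : req ∈ pvPart fc) :
    ∀ y ∈ pvCands req fc, pvKey ((1 : Int), false, req) ≤ pvKey y := by
  rintro ⟨y1, y2, y3⟩ hy
  obtain ⟨hflag, hcls⟩ := pv_cands_shape req fc hy
  dsimp only at hflag
  rw [pvKey_le_iff]
  rcases hcls with ⟨_, hyc⟩ | ⟨hy1, _⟩
  · rw [hc] at hyc
    exact absurd hyc (List.not_mem_nil)
  · right
    refine ⟨hy1.symm, ?_⟩
    by_cases hy3 : y3 = req
    · right
      simp only [hflag]
      simp [hy3]
    · left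
      simp only [hflag]
      simp [hy3, Bool.lt_iff]

theorem pv_min_part_head (req : String) (fc : List (String × List (String × Option Int)))
    (hc : pvCompl fc = []) (hreq : req ∉ pvPart fc) {s : String}
    (hmin : ∀ y ∈ pvPart fc, s ≤ y) :
    ∀ y ∈ pvCands req fc, pvKey ((1 : Int), true, s) ≤ pvKey y := by
  rintro ⟨y1, y2, y3⟩ hy
  obtain ⟨hflag, hcls⟩ := pv_cands_shape req fc hy
  dsimp only at hflag
  rw [pvKey_le_iff]
  rcases hcls with ⟨_, hyc⟩ | ⟨hy1, hyc⟩
  · rw [hc] at hyc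
    exact absurd hyc (List.not_mem_nil)
  · right
    refine ⟨hy1.symm, Or.inr ⟨?_, hmin _ hyc⟩⟩
    have : y3 ≠ req := fun h => hreq (h ▸ hyc)
    simp [hflag, this]

-- ===== VERDICT (by name: the statement is the Claim_ definition above) =====
theorem select_fixed_cam_py_spec : Claim_equal_select_fixed_cam_py := by
  intro fc req _ hpre
  unfold Spec_select_fixed_cam_py
  -- both sides in terms of pvCompl / pvPart / pvCands
  have hA : select_fixed_cam_py fc req =
      (if (pvCompl fc).contains req then req
       else if !(pvCompl fc).isEmpty then
         (match PySem.List.sorted (pvCompl fc) (fun x => x) false with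
          | s :: _ => s
          | [] => "")
       else if (pvPart fc).contains req then req
       else if !(pvPart fc).isEmpty then
         (match PySem.List.sorted (pvPart fc) (fun x => x) false with
          | s :: _ => s
          | [] => "")
       else "") := by
    unfold select_fixed_cam_py
    rw [pvFoldA]
    rfl
  -- the candidate list is nonempty under Pre_
  have hne : pvCands req fc ≠ [] := by
    rw [Pre_select_fixed_cam_py, List.any_eq_true] at hpre
    obtain ⟨p, hp, ht⟩ := hpre
    intro h
    have : ((if pyHasVal p.2 "K" then (0 : Int) else 1), decide (p.1 ≠ req), p.1) ∈ pvCands req fc := by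
      simp only [pvCands, List.mem_filterMap]
      exact ⟨p, hp, by rw [if_pos ht]⟩
    rw [h] at this
    exact absurd this (List.not_mem_nil)
  obtain ⟨c, rest, hcs⟩ : ∃ c rest, pvCands req fc = c :: rest := by
    cases h : pvCands req fc with
    | nil => exact absurd h hne
    | cons c rest => exact ⟨c, rest, rfl⟩
  have hB : select_fixed_cam_py_alt fc req =
      (rest.foldl (fun m x => if pyKeyLt x m then x else m) c).2.2 := by
    unfold select_fixed_cam_py_alt
    rw [pvFoldB, List.nil_append, hcs]
  obtain ⟨hmem, hmin⟩ := pvMinFold_spec rest c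
  rw [← hcs] at hmem hmin
  rw [hA, hB]
  by_cases h1 : (pvCompl fc).contains req
  · -- requested camera is complete
    have hreq : req ∈ pvCompl fc := by simpa using h1
    have hkmem : ((0 : Int), false, req) ∈ pvCands req fc := by
      have := (pv_mem_compl_iff req fc req).mp hreq
      simpa using this
    have := pv_min_unique hmem hmin hkmem (pv_min_compl_self req fc hreq)
    rw [if_pos h1, this]
  rw [if_neg h1]
  have hreq1 : req ∉ pvCompl fc := by simpa using h1
  by_cases h2 : pvCompl fc = []
  · -- no complete camera
    rw [if_neg (by simp [h2])]
    by_cases h3 : (pvPart fc).contains req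
    · have hreq : req ∈ pvPart fc := by simpa using h3
      have hkmem : ((1 : Int), false, req) ∈ pvCands req fc := by
        have := (pv_mem_part_iff req fc req).mp hreq
        simpa using this
      have := pv_min_unique hmem hmin hkmem (pv_min_part_self req fc h2 hreq)
      rw [if_pos h3, this]
    rw [if_neg h3]
    have hreq3 : req ∉ pvPart fc := by simpa using h3
    by_cases h4 : pvPart fc = []
    · -- both lists empty: contradicts the nonempty candidate list
      exfalso
      have hc : c ∈ pvCands req fc := by rw [hcs]; exact List.mem_cons_self ..
      obtain ⟨_, hcls⟩ := pv_cands_shape req fc hc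
      rcases hcls with ⟨_, h⟩ | ⟨_, h⟩
      · rw [h2] at h
        exact absurd h (List.not_mem_nil)
      · rw [h4] at h
        exact absurd h (List.not_mem_nil)
    rw [if_pos (by simpa using h4)]
    cases hsort : PySem.List.sorted (pvPart fc) (fun x => x) false with
    | nil => exact absurd (((PySem.List.sorted_eq_nil_iff _ _ _).mp hsort)) h4
    | cons s tl =>
      have hsmem : s ∈ pvPart fc :=
        (PySem.List.mem_sorted _ _ _ _).mp (hsort ▸ List.mem_cons_self ..)
      have hsmin : ∀ y ∈ pvPart fc, s ≤ y := fun y hy => PySem.List.key_head_sorted_le _ _ hsort y hy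
      have hsne : s ≠ req := fun h => hreq3 (h ▸ hsmem)
      have hkmem : ((1 : Int), true, s) ∈ pvCands req fc := by
        have := (pv_mem_part_iff req fc s).mp hsmem
        simpa [hsne] using this
      have := pv_min_unique hmem hmin hkmem (pv_min_part_head req fc h2 hreq3 hsmin)
      rw [this]
  · -- some complete camera, requested one not among them
    rw [if_pos (by simpa using h2)]
    cases hsort : PySem.List.sorted (pvCompl fc) (fun x => x) false with
    | nil => exact absurd (((PySem.List.sorted_eq_nil_iff _ _ _).mp hsort)) h2
    | cons s tl =>
      have hsmem : s ∈ pvCompl fc :=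
        (PySem.List.mem_sorted _ _ _ _).mp (hsort ▸ List.mem_cons_self ..)
      have hsmin : ∀ y ∈ pvCompl fc, s ≤ y := fun y hy => PySem.List.key_head_sorted_le _ _ hsort y hy
      have hsne : s ≠ req := fun h => hreq1 (h ▸ hsmem)
      have hkmem : ((0 : Int), true, s) ∈ pvCands req fc := by
        have := (pv_mem_compl_iff req fc s).mp hsmem
        simpa [hsne] using this
      have := pv_min_unique hmem hmin hkmem (pv_min_compl_head req fc hreq1 hsmin)
      rw [this]
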